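-- pv_equiv track=rewrite | github.com/rodrigorincon/statistics | 2-centro-e-dispersao/python/04-boxplot.py | adjust_max_and_min
-- ===== SOURCE A (Python) =====
-- def adjust_max_and_min(my_list, value, is_min):
-- 	if value < my_list[0]:
-- 		return my_list[0]
-- 	elif value > my_list[-1]:
-- 		return my_list[-1]
-- 	elif value in my_list:
-- 		return value
-- 	else:
-- 		if is_min:
-- 			for item in my_list:
-- 				if item > value:
-- 					return item
-- 		else:
-- 			for item in my_list[::-1]:
-- 				if item < value:
-- 					return item
-- ===== SOURCE B (Python) =====
-- def adjust_max_and_min(my_list, value, is_min):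
--     contains = False
--     first_gt = None
--     last_lt = None
--     for x in my_list:
--         if x == value:
--             contains = True
--         if first_gt is None and x > value:
--             first_gt = x
--         if x < value:
--             last_lt = x
--     first, last = my_list[0], my_list[-1]
--     if value < first:
--         return first
--     if value > last:
--         return last
--     if contains:
--         return value
--     return first_gt if is_min else last_lt
-- ===== Notes on version B (the rewrite author's own statement) =====
-- stated objective: alternative
-- what changed: Replaces A's guard chain with early returns, membership test and two directional scans (one over the reversed list) by a single forward fold that collects (contains, first element > value, last element < value) in one pass, followed by one final decision; same O(n) cost.
import Mathlib
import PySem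

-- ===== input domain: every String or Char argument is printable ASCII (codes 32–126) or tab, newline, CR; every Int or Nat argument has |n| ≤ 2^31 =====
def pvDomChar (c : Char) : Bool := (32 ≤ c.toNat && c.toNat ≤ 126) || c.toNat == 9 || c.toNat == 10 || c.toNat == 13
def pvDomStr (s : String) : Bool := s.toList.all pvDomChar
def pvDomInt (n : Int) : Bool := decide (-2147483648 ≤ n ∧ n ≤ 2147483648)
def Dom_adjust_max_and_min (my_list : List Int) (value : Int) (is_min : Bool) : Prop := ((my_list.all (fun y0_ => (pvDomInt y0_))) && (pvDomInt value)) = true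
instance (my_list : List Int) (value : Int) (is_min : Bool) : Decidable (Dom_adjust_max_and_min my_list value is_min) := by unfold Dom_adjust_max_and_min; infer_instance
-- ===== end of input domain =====

-- B replaces A's guard chain with directional scans (one over the reversed list) by a single
-- forward fold collecting (contains, first >value, last <value) plus one final decision;
-- objective: alternative one-pass structure, same O(n) cost.

-- ===== PORT A =====
-- 'for item in my_list: if item > value: return item' (first item > value, none if the loop falls off)
def pvScanGT : List Int → Int → Option Int
  | [], _ => none
  | x :: xs, v => if x > v then some x else pvScanGT xs v

-- 'for item in my_list[::-1]: if item < value: return item'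
def pvScanLT : List Int → Int → Option Int
  | [], _ => none
  | x :: xs, v => if x < v then some x else pvScanLT xs v

-- literal transliteration of A; pyGet? = none is Python's IndexError on the empty list and the
-- final .getD 0 stands for Python's implicit None when a scan falls off — both outside Pre_.
def adjust_max_and_min (my_list : List Int) (value : Int) (is_min : Bool) : Int :=
  match PySem.List.pyGet? my_list 0, PySem.List.pyGet? my_list (-1) with
  | some h0, some hl =>
    if value < h0 then h0
    else if value > hl then hl
    else if value ∈ my_list then value
    else if is_min then (pvScanGT my_list value).getD 0
    else (pvScanLT ((PySem.List.slice? my_list none none (-1)).getD []) value).getD 0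
  | _, _ => 0

-- ===== PORT B =====
-- literal transliteration of Source B: one fold over the list with state
-- (contains, first_gt, last_lt), then the final decision; pyGet? = none is Python's
-- IndexError on the empty list and the final .getD 0 is Python's None fallback — both
-- outside Pre_ (resp. unreachable there).
def pvStep (value : Int) (s : Bool × Option Int × Option Int) (x : Int) :
    Bool × Option Int × Option Int :=
  (s.1 || (x == value),
   if s.2.1 = none ∧ x > value then some x else s.2.1,
   if x < value then some x else s.2.2)

def adjust_max_and_min_alt (my_list : List Int) (value : Int) (is_min : Bool) : Int :=
  let st := my_list.foldl (pvStep value) (false, none, none)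
  match PySem.List.pyGet? my_list 0 with
  | none => 0
  | some first =>
    match PySem.List.pyGet? my_list (-1) with
    | none => 0
    | some last =>
      if value < first then first
      else if value > last then last
      else if st.1 then value
      else if is_min then st.2.1.getD 0 else st.2.2.getD 0

-- ===== PRECONDITION & SPEC =====
-- Pre_ excludes only the empty list, on which A raises IndexError (my_list[0]); B raises there too.
def Pre_adjust_max_and_min (my_list : List Int) (value : Int) (is_min : Bool) : Prop :=
  my_list ≠ []
instance (my_list : List Int) (value : Int) (is_min : Bool) : Decidable (Pre_adjust_max_and_min my_list value is_min) := by unfold Pre_adjust_max_and_min; infer_instance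

def pvWitness_adjust_max_and_min : List Int × Int × Bool := ([1, 3, 7], 4, true)

def Spec_adjust_max_and_min (my_list : List Int) (value : Int) (is_min : Bool) (out : Int) : Prop := out = adjust_max_and_min_alt my_list value is_min
instance (my_list : List Int) (value : Int) (is_min : Bool) (out : Int) : Decidable (Spec_adjust_max_and_min my_list value is_min out) := by unfold Spec_adjust_max_and_min; infer_instance

-- ===== CLAIM (what is proved, stated in full; the proofs are below) =====
def Claim_equal_adjust_max_and_min : Prop := ∀ (my_list : List Int) (value : Int) (is_min : Bool), Dom_adjust_max_and_min my_list value is_min → Pre_adjust_max_and_min my_list value is_min → Spec_adjust_max_and_min my_list value is_min (adjust_max_and_min my_list value is_min)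

-- ===== LEMMAS AND PROOFS =====

theorem pvScanGT_eq_find? (l : List Int) (v : Int) :
    pvScanGT l v = l.find? (fun x => v < x) := by
  induction l with
  | nil => rfl
  | cons x xs ih =>
    simp only [pvScanGT, List.find?]
    by_cases h : v < x <;> simp [h, ih]

theorem pvScanLT_eq_find? (l : List Int) (v : Int) :
    pvScanLT l v = l.find? (fun x => x < v) := by
  induction l with
  | nil => rfl
  | cons x xs ih =>
    simp only [pvScanLT, List.find?]
    by_cases h : x < v <;> simp [h, ih]

-- the contains component of the fold
theorem fold_fst (l : List Int) (v : Int) (c : Bool) (g lt : Option Int) :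
    (l.foldl (pvStep v) (c, g, lt)).1 = (c || l.any (fun x => x == v)) := by
  induction l generalizing c g lt with
  | nil => simp
  | cons x xs ih =>
    simp [List.foldl_cons, pvStep, ih, Bool.or_assoc]

-- the first_gt component of the fold: kept once set, otherwise the first element > v
theorem fold_snd (l : List Int) (v : Int) (c : Bool) (g lt : Option Int) :
    (l.foldl (pvStep v) (c, g, lt)).2.1 = g.or (l.find? (fun x => v < x)) := by
  induction l generalizing c g lt with
  | nil => simp
  | cons x xs ih =>
    cases g with
    | some y => simp [List.foldl_cons, pvStep, ih]
    | none =>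
      by_cases h : v < x
      · simp [List.foldl_cons, pvStep, h, ih, List.find?]
      · simp [List.foldl_cons, pvStep, h, ih, List.find?]

-- the last_lt component: overwritten on every x < v, so the last such element wins,
-- i.e. the first element < v of the reversed list (with the initial value as fallback)
theorem fold_trd (l : List Int) (v : Int) (c : Bool) (g lt : Option Int) :
    (l.foldl (pvStep v) (c, g, lt)).2.2 = (l.reverse.find? (fun x => x < v)).or lt := by
  induction l generalizing c g lt with
  | nil => simp
  | cons x xs ih =>
    simp only [List.foldl_cons, List.reverse_cons, List.find?_append, pvStep]
    rw [ih]
    by_cases h : x < v <;> simp [List.find?, h]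

-- ===== VERDICT (by name: the statement is the Claim_ definition above) =====
theorem adjust_max_and_min_spec : Claim_equal_adjust_max_and_min := by
  intro l v m _ hne
  unfold Spec_adjust_max_and_min adjust_max_and_min adjust_max_and_min_alt
  cases hhd : PySem.List.pyGet? l 0 with
  | none => simp
  | some a =>
  cases hlast : PySem.List.pyGet? l (-1) with
  | none => simp
  | some z =>
  simp only []
  by_cases h1 : v < a
  · simp [h1]
  · by_cases h2 : z < v
    · simp [h1, h2]
    · by_cases h3 : v ∈ l
      · have : (l.foldl (pvStep v) (false, none, none)).1 = true := by
          rw [fold_fst]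
          refine Bool.or_eq_true_iff.mpr (Or.inr ?_)
          exact List.any_eq_true.mpr ⟨v, h3, by simp⟩
        simp [h1, h2, h3, this]
      · have hc : (l.foldl (pvStep v) (false, none, none)).1 = false := by
          rw [fold_fst]
          simp only [Bool.false_or, List.any_eq_false]
          intro x hx
          simp only [beq_iff_eq]
          intro he
          exact h3 (he ▸ hx)
        cases m with
        | true =>
          simp [h1, h2, h3, hc, pvScanGT_eq_find?, fold_snd]
        | false =>
          simp [h1, h2, h3, hc, pvScanLT_eq_find?, fold_trd,
                PySem.List.slice?_none_none_neg_one]
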